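-- pv_equiv track=rewrite | github.com/vipulsingh24/DSA | Problems/police_catch_thief.py | max_number_thief_caught
-- ===== SOURCE A (Python) =====
-- def max_number_thief_caught(arr, k):
--     n = len(arr)
--     i = 0
--     t = 0
--     p = 0
--     result = 0
--     theif = []  # [1,2,4]  # [0,1,4]
--     police = []  # [0,3]   # [2,3,5]s
--
--     while i < n:
--         if arr[i] == "P":
--             police.append(i)
--         elif arr[i] == "T":
--             theif.append(i)
--         i += 1
--
--     while t < len(theif) and p < len(police):
--         if abs(theif[t] - police[p]) <= k:
--             result += 1
--             t += 1
--             p += 1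
--         elif theif[t] < police[p]:
--             t += 1
--         else:
--             p += 1
--
--     return result
-- ===== SOURCE B (Python) =====
-- def max_number_thief_caught(arr, k):
--     police = []
--     thieves = []
--     result = 0
--     for i, c in enumerate(arr):
--         while police and police[0] < i - k:
--             police.pop(0)
--         while thieves and thieves[0] < i - k:
--             thieves.pop(0)
--         if c == "P":
--             if thieves:
--                 thieves.pop(0)
--                 result += 1
--             else:
--                 police.append(i)
--         elif c == "T":
--             if police:
--                 police.pop(0)
--                 result += 1
--             else:
--                 thieves.append(i)
--     return result
-- ===== Notes on version B (the rewrite author's own statement) =====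
-- stated objective: alternative
-- what changed: Replaced A's two-phase scheme (collect all police/thief indices, then two-pointer matching) by a single pass that maintains two FIFO queues of pending indices, evicting fronts farther than k and matching opposites immediately.
import Mathlib
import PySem

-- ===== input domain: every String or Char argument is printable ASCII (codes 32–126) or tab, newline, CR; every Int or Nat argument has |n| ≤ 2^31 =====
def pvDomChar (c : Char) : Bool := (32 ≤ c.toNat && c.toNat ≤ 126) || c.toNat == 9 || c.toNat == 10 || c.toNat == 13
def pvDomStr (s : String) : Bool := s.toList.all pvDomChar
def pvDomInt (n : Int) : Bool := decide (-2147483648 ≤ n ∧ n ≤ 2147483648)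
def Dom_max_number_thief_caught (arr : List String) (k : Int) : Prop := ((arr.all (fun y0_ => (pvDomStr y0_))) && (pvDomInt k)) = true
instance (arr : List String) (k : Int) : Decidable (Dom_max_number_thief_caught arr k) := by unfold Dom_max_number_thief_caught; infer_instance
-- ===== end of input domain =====

-- B replaces A's two-phase collect-then-two-pointer matching by one pass with two
-- pending-index FIFO queues (alternative algorithm, same cost); return values agree.

-- ===== PORT A =====
-- first while loop of A: walk the array with index i, appending to police/theif
def pvScanA (arr : List String) (i : Int) (police theif : List Int) : List Int × List Int :=
  match arr with
  | [] => (police, theif)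
  | c :: rest =>
    if c = "P" then pvScanA rest (i + 1) (police ++ [i]) theif
    else if c = "T" then pvScanA rest (i + 1) police (theif ++ [i])
    else pvScanA rest (i + 1) police theif

-- second while loop of A: two pointers consume the fronts of theif/police
def pvMatchA (k : Int) (theif police : List Int) : Int :=
  match theif, police with
  | t :: ts, p :: ps =>
    if |t - p| ≤ k then 1 + pvMatchA k ts ps
    else if t < p then pvMatchA k ts (p :: ps)
    else pvMatchA k (t :: ts) ps
  | _, _ => 0

def max_number_thief_caught (arr : List String) (k : Int) : Int :=
  let s := pvScanA arr 0 [] []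
  pvMatchA k s.2 s.1

-- ===== PORT B =====
-- the two 'while q and q[0] < i - k: q.pop(0)' loops of Source B
def pvEvict (q : List Int) (b : Int) : List Int :=
  match q with
  | [] => []
  | j :: rest => if j < b then pvEvict rest b else j :: rest

-- Source B's single for-loop over enumerate(arr) with state (police, thieves, result)
def pvLoopB (k : Int) (arr : List String) (i : Int) (police thieves : List Int) (result : Int) : Int :=
  match arr with
  | [] => result
  | c :: rest =>
    let police := pvEvict police (i - k)
    let thieves := pvEvict thieves (i - k)
    if c = "P" then
      match thieves with
      | _ :: t2 => pvLoopB k rest (i + 1) police t2 (result + 1)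
      | [] => pvLoopB k rest (i + 1) (police ++ [i]) thieves result
    else if c = "T" then
      match police with
      | _ :: p2 => pvLoopB k rest (i + 1) p2 thieves (result + 1)
      | [] => pvLoopB k rest (i + 1) police (thieves ++ [i]) result
    else pvLoopB k rest (i + 1) police thieves result

def max_number_thief_caught_alt (arr : List String) (k : Int) : Int :=
  pvLoopB k arr 0 [] [] 0

-- ===== PRECONDITION & SPEC =====
def Spec_max_number_thief_caught (arr : List String) (k : Int) (out : Int) : Prop := out = max_number_thief_caught_alt arr k
instance (arr : List String) (k : Int) (out : Int) : Decidable (Spec_max_number_thief_caught arr k out) := by unfold Spec_max_number_thief_caught; infer_instance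

-- ===== CLAIM (what is proved, stated in full; the proofs are below) =====
def Claim_equal_max_number_thief_caught : Prop := ∀ (arr : List String) (k : Int), Dom_max_number_thief_caught arr k → Spec_max_number_thief_caught arr k (max_number_thief_caught arr k)

-- ===== LEMMAS AND PROOFS =====

-- police / thief index lists of arr starting at index i, built front-to-back
def pvPol (arr : List String) (i : Int) : List Int :=
  match arr with
  | [] => []
  | c :: rest => if c = "P" then i :: pvPol rest (i + 1) else pvPol rest (i + 1)

def pvThf (arr : List String) (i : Int) : List Int :=
  match arr with
  | [] => []
  | c :: rest => if c = "T" then i :: pvThf rest (i + 1) else pvThf rest (i + 1)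

theorem pvScanA_eq (arr : List String) : ∀ (i : Int) (pol th : List Int),
    pvScanA arr i pol th = (pol ++ pvPol arr i, th ++ pvThf arr i) := by
  induction arr with
  | nil => intro i pol th; simp [pvScanA, pvPol, pvThf]
  | cons c rest ih =>
    intro i pol th
    by_cases hP : c = "P"
    · simp [pvScanA, pvPol, pvThf, hP, ih]
    · by_cases hT : c = "T" <;> simp [pvScanA, pvPol, pvThf, hP, hT, ih]

theorem pvPol_ge (arr : List String) : ∀ (i : Int), ∀ p ∈ pvPol arr i, i ≤ p := by
  induction arr with
  | nil => intro i p hp; simp [pvPol] at hp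
  | cons c rest ih =>
    intro i p hp
    by_cases hP : c = "P" <;> simp [pvPol, hP] at hp
    · rcases hp with rfl | hp
      · omega
      · have := ih (i + 1) p hp; omega
    · have := ih (i + 1) p hp; omega

theorem pvThf_ge (arr : List String) : ∀ (i : Int), ∀ p ∈ pvThf arr i, i ≤ p := by
  induction arr with
  | nil => intro i p hp; simp [pvThf] at hp
  | cons c rest ih =>
    intro i p hp
    by_cases hT : c = "T" <;> simp [pvThf, hT] at hp
    · rcases hp with rfl | hp
      · omega
      · have := ih (i + 1) p hp; omega
    · have := ih (i + 1) p hp; omega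

theorem pvMatchA_nil_left (k : Int) (pl : List Int) : pvMatchA k [] pl = 0 := by
  cases pl <;> simp [pvMatchA]

theorem pvMatchA_nil_right (k : Int) (tl : List Int) : pvMatchA k tl [] = 0 := by
  cases tl <;> simp [pvMatchA]

-- dropping a thief j that every police p exceeds by more than k changes nothing
theorem pvMatchA_drop_thief (k j : Int) (tl pl : List Int)
    (h : ∀ p ∈ pl, j < p ∧ k < p - j) :
    pvMatchA k (j :: tl) pl = pvMatchA k tl pl := by
  cases pl with
  | nil => simp [pvMatchA_nil_right]
  | cons p ps =>
    have hp := h p (by simp)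
    have habs : |j - p| = p - j := by
      rw [abs_sub_comm]; exact abs_of_nonneg (by omega)
    simp only [pvMatchA, habs]
    rw [if_neg (by omega), if_pos hp.1]

-- symmetrically for a police j exceeded by every thief by more than k
theorem pvMatchA_drop_police (k j : Int) (tl pl : List Int)
    (h : ∀ t ∈ tl, j < t ∧ k < t - j) :
    pvMatchA k tl (j :: pl) = pvMatchA k tl pl := by
  cases tl with
  | nil => simp [pvMatchA_nil_left]
  | cons t ts =>
    have ht := h t (by simp)
    have habs : |t - j| = t - j := abs_of_nonneg (by omega)
    simp only [pvMatchA, habs]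
    rw [if_neg (by omega), if_neg (by omega)]

theorem pvEvict_sublist (b : Int) : ∀ (q : List Int), List.Sublist (pvEvict q b) q := by
  intro q
  induction q with
  | nil => simp [pvEvict]
  | cons j rest ih =>
    simp only [pvEvict]
    split
    · exact ih.trans (List.sublist_cons_self j rest)
    · exact List.Sublist.refl _

theorem pvEvict_mem (b : Int) (q : List Int) {x : Int} (hx : x ∈ pvEvict q b) : x ∈ q :=
  (pvEvict_sublist b q).mem hx

theorem pvEvict_nil_of_nil (b : Int) : pvEvict [] b = [] := rfl

theorem pvEvict_ge (b : Int) : ∀ (q : List Int), q.Pairwise (· < ·) →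
    ∀ x ∈ pvEvict q b, b ≤ x := by
  intro q
  induction q with
  | nil => intro _ x hx; simp [pvEvict] at hx
  | cons j rest ih =>
    intro hpw x hx
    simp only [pvEvict] at hx
    split at hx
    · exact ih (List.Pairwise.of_cons hpw) x hx
    · rcases List.mem_cons.mp hx with rfl | hx
      · omega
      · have := (List.pairwise_cons.mp hpw).1 x hx; omega

-- iterated drops: evicting thieves below i - k is invisible when all police are ≥ i
theorem pvMatchA_evict_thief (k i : Int) (ts pl : List Int) :
    ∀ (tq : List Int), tq.Pairwise (· < ·) → (∀ j ∈ tq, j < i) → (∀ p ∈ pl, i ≤ p) →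
    pvMatchA k (tq ++ ts) pl = pvMatchA k (pvEvict tq (i - k) ++ ts) pl := by
  intro tq
  induction tq with
  | nil => intro _ _ _; rfl
  | cons j rest ih =>
    intro hpw hlt hpl
    simp only [pvEvict]
    split
    · rename_i hj
      rw [List.cons_append, pvMatchA_drop_thief k j]
      · exact ih (List.Pairwise.of_cons hpw) (fun x hx => hlt x (by simp [hx])) hpl
      · intro p hp
        have := hpl p hp
        have hji := hlt j (by simp)
        constructor <;> omega
    · rfl

theorem pvMatchA_evict_police (k i : Int) (tl pl : List Int) :
    ∀ (pq : List Int), pq.Pairwise (· < ·) → (∀ j ∈ pq, j < i) → (∀ t ∈ tl, i ≤ t) →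
    pvMatchA k tl (pq ++ pl) = pvMatchA k tl (pvEvict pq (i - k) ++ pl) := by
  intro pq
  induction pq with
  | nil => intro _ _ _; rfl
  | cons j rest ih =>
    intro hpw hlt htl
    simp only [pvEvict]
    split
    · rename_i hj
      rw [List.cons_append, pvMatchA_drop_police k j]
      · exact ih (List.Pairwise.of_cons hpw) (fun x hx => hlt x (by simp [hx])) htl
      · intro t ht
        have := htl t ht
        have hji := hlt j (by simp)
        constructor <;> omega
    · rfl

-- main invariant: B's loop, started on any consistent intermediate state,
-- computes A's two-pointer matching on the pending queues ++ the future indices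
theorem pvLoopB_eq (k : Int) : ∀ (arr : List String) (i : Int) (pq tq : List Int) (res : Int),
    (pq = [] ∨ tq = []) →
    pq.Pairwise (· < ·) → tq.Pairwise (· < ·) →
    (∀ j ∈ pq, j < i) → (∀ j ∈ tq, j < i) →
    pvLoopB k arr i pq tq res = res + pvMatchA k (tq ++ pvThf arr i) (pq ++ pvPol arr i) := by
  intro arr
  induction arr with
  | nil =>
    intro i pq tq res hdisj _ _ _ _
    rcases hdisj with rfl | rfl
    · simp [pvLoopB, pvPol, pvThf, pvMatchA_nil_right]
    · simp [pvLoopB, pvPol, pvThf, pvMatchA_nil_left]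
  | cons c rest ih =>
    intro i pq tq res hdisj hpwp hpwt hltp hltt
    have hsubp := pvEvict_sublist (i - k) pq
    have hsubt := pvEvict_sublist (i - k) tq
    have hpwp' : (pvEvict pq (i - k)).Pairwise (· < ·) := hpwp.sublist hsubp
    have hpwt' : (pvEvict tq (i - k)).Pairwise (· < ·) := hpwt.sublist hsubt
    have hltp' : ∀ j ∈ pvEvict pq (i - k), j < i + 1 := fun j hj => by
      have := hltp j (pvEvict_mem _ _ hj); omega
    have hltt' : ∀ j ∈ pvEvict tq (i - k), j < i + 1 := fun j hj => by
      have := hltt j (pvEvict_mem _ _ hj); omega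
    by_cases hP : c = "P"
    · -- police at index i
      subst hP
      simp only [pvLoopB, pvPol, pvThf, String.reduceEq, reduceIte]
      rcases hdisj with rfl | rfl
      · -- police queue empty
        simp only [pvEvict_nil_of_nil, List.nil_append]
        rw [pvMatchA_evict_thief k i _ (i :: pvPol rest (i + 1)) tq hpwt hltt
          (by intro p hp
              rcases List.mem_cons.mp hp with rfl | hp
              · omega
              · have := pvPol_ge rest (i + 1) p hp; omega)]
        cases htq' : pvEvict tq (i - k) with
        | nil =>
          show pvLoopB k rest (i + 1) [i] [] res = _
          rw [ih (i + 1) [i] [] res (Or.inr rfl)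
            (by simp) (by simp) (by intro j hj; simp at hj; omega) (by simp)]
          simp
        | cons j t2 =>
          rw [htq'] at hpwt' hltt'
          have hjb : i - k ≤ j := by
            have := pvEvict_ge (i - k) tq hpwt j (by rw [htq']; simp); omega
          have hji : j < i := by
            have := hltt j (pvEvict_mem _ _ (by rw [htq']; simp)); omega
          have habs : |j - i| ≤ k := by rw [abs_sub_comm, abs_of_nonneg (by omega)]; omega
          show pvLoopB k rest (i + 1) [] t2 (res + 1) = _
          simp only [List.cons_append, pvMatchA, if_pos habs]
          rw [ih (i + 1) [] t2 (res + 1) (Or.inl rfl) (by simp) hpwt'.of_cons (by simp)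
            (fun x hx => hltt' x (by simp [hx]))]
          simp; ring
      · -- thief queue empty: push i onto the police queue
        simp only [pvEvict_nil_of_nil, List.nil_append]
        rw [pvMatchA_evict_police k i (pvThf rest (i + 1)) (i :: pvPol rest (i + 1)) pq hpwp hltp
          (by intro t ht
              have := pvThf_ge rest (i + 1) t ht; omega)]
        rw [ih (i + 1) (pvEvict pq (i - k) ++ [i]) [] res (Or.inr rfl)
          (by rw [List.pairwise_append]
              refine ⟨hpwp', by simp, ?_⟩
              intro a ha b hb
              simp at hb; subst hb
              have := hltp a (pvEvict_mem _ _ ha); omega)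
          (by simp)
          (by intro j hj
              rcases List.mem_append.mp hj with hj | hj
              · exact hltp' j hj
              · simp at hj; omega)
          (by simp)]
        simp
    · by_cases hT : c = "T"
      · -- thief at index i
        subst hT
        simp only [pvLoopB, pvPol, pvThf, String.reduceEq, reduceIte]
        rcases hdisj with rfl | rfl
        · -- police queue empty: push i onto the thief queue
          simp only [pvEvict_nil_of_nil, List.nil_append]
          rw [pvMatchA_evict_thief k i (i :: pvThf rest (i + 1)) (pvPol rest (i + 1)) tq hpwt hltt
            (by intro p hp
                have := pvPol_ge rest (i + 1) p hp; omega)]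
          rw [ih (i + 1) [] (pvEvict tq (i - k) ++ [i]) res (Or.inl rfl)
            (by simp)
            (by rw [List.pairwise_append]
                refine ⟨hpwt', by simp, ?_⟩
                intro a ha b hb
                simp at hb; subst hb
                have := hltt a (pvEvict_mem _ _ ha); omega)
            (by simp)
            (by intro j hj
                rcases List.mem_append.mp hj with hj | hj
                · exact hltt' j hj
                · simp at hj; omega)]
          simp
        · -- thief queue empty
          simp only [pvEvict_nil_of_nil, List.nil_append]
          rw [pvMatchA_evict_police k i (i :: pvThf rest (i + 1)) (pvPol rest (i + 1)) pq hpwp hltp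
            (by intro t ht
                rcases List.mem_cons.mp ht with rfl | ht
                · omega
                · have := pvThf_ge rest (i + 1) t ht; omega)]
          cases hpq' : pvEvict pq (i - k) with
          | nil =>
            show pvLoopB k rest (i + 1) [] [i] res = _
            rw [ih (i + 1) [] [i] res (Or.inl rfl)
              (by simp) (by simp) (by simp) (by intro j hj; simp at hj; omega)]
            simp
          | cons j p2 =>
            rw [hpq'] at hpwp' hltp'
            have hjb : i - k ≤ j := by
              have := pvEvict_ge (i - k) pq hpwp j (by rw [hpq']; simp); omega
            have hji : j < i := by
              have := hltp j (pvEvict_mem _ _ (by rw [hpq']; simp)); omega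
            have habs : |i - j| ≤ k := by rw [abs_of_nonneg (by omega)]; omega
            show pvLoopB k rest (i + 1) p2 [] (res + 1) = _
            simp only [List.cons_append, pvMatchA, if_pos habs]
            rw [ih (i + 1) p2 [] (res + 1) (Or.inr rfl) hpwp'.of_cons (by simp)
              (fun x hx => hltp' x (by simp [hx])) (by simp)]
            simp; ring
      · -- neither police nor thief
        simp only [pvLoopB, pvPol, pvThf, if_neg hP, if_neg hT]
        rcases hdisj with rfl | rfl
        · simp only [pvEvict_nil_of_nil, List.nil_append]
          rw [pvMatchA_evict_thief k i (pvThf rest (i + 1)) (pvPol rest (i + 1)) tq hpwt hltt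
            (by intro p hp
                have := pvPol_ge rest (i + 1) p hp; omega)]
          rw [ih (i + 1) [] (pvEvict tq (i - k)) res (Or.inl rfl) (by simp) hpwt' (by simp) hltt']
          simp
        · simp only [pvEvict_nil_of_nil, List.nil_append]
          rw [pvMatchA_evict_police k i (pvThf rest (i + 1)) (pvPol rest (i + 1)) pq hpwp hltp
            (fun t ht => by have := pvThf_ge rest (i + 1) t ht; omega)]
          rw [ih (i + 1) (pvEvict pq (i - k)) [] res (Or.inr rfl) hpwp' (by simp) hltp' (by simp)]
          simp

-- ===== VERDICT (by name: the statement is the Claim_ definition above) =====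
theorem max_number_thief_caught_spec : Claim_equal_max_number_thief_caught := by
  intro arr k _
  unfold Spec_max_number_thief_caught max_number_thief_caught max_number_thief_caught_alt
  rw [pvScanA_eq, pvLoopB_eq k arr 0 [] [] 0 (Or.inl rfl) (by simp) (by simp) (by simp) (by simp)]
  simp
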